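-- pv_equiv track=rewrite | github.com/jma1999/RIG | ingest/ifcjson_to_neo4j.py | select_flat_props
-- ===== SOURCE A (Python) =====
-- def select_flat_props(ps: dict) -> dict:
--     """
--     Pick a few commonly useful pset fields and turn them into real properties.
--     Extend this list as you learn your model.
--     """
--     keep_keys = [
--         "Pset_Manufacturer.Manufacturer",
--         "Pset_Manufacturer.ModelReference",
--         "Pset_Asset.SerialNumber",
--         "Pset_Asset.InstallationDate",
--         "InstallYear",
--         "Pset_MemberCommon.Span",
--         "Pset_MemberCommon.IsExternal",
--         "Pset_MemberCommon.Reference",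
--         "Pset_MemberCommon.LoadBearing",
--     ]
--     out = {}
--     for k in keep_keys:
--         if k in ps:
--             sk = k.replace(".", "_").replace(" ", "_")
--             out[sk] = ps.get(k)
--     return out
-- ===== SOURCE B (Python) =====
-- _KEEP = [
--     "Pset_Manufacturer.Manufacturer",
--     "Pset_Manufacturer.ModelReference",
--     "Pset_Asset.SerialNumber",
--     "Pset_Asset.InstallationDate",
--     "InstallYear",
--     "Pset_MemberCommon.Span",
--     "Pset_MemberCommon.IsExternal",
--     "Pset_MemberCommon.Reference",
--     "Pset_MemberCommon.LoadBearing",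
-- ]
-- _RANK = {k: i for i, k in enumerate(_KEEP)}
--
--
-- def select_flat_props(ps: dict) -> dict:
--     # drive the traversal by the input dict: filter, then sort by whitelist rank
--     kept = [(k, v) for k, v in ps.items() if k in _RANK]
--     kept.sort(key=lambda kv: _RANK[kv[0]])
--     return {k.replace(".", "_").replace(" ", "_"): v for k, v in kept}
-- ===== Notes on version B (the rewrite author's own statement) =====
-- stated objective: alternative
-- what changed: B traverses the input dict once, keeping the pairs whose key is in a precomputed whitelist rank map, then sorts the kept pairs by whitelist rank and renames the keys, instead of A's scan over the fixed key list probing the dict.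
import Mathlib
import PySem

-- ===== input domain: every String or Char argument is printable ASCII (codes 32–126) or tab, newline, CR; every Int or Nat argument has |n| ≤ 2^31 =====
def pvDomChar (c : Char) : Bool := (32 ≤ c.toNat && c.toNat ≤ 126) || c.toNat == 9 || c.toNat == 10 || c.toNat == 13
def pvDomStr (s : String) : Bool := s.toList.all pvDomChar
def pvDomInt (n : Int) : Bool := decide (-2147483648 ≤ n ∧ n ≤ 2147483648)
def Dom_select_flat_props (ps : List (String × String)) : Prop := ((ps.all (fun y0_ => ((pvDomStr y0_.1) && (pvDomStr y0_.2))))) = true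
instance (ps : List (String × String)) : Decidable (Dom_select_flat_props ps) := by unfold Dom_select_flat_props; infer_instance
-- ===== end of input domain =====

-- B replaces A's fixed-whitelist scan probing the dict by a single filtering pass over
-- the dict's items followed by a sort on precomputed whitelist ranks (alternative, not faster).

-- ===== PORT A =====
def pvKeepKeys : List String :=
  ["Pset_Manufacturer.Manufacturer",
   "Pset_Manufacturer.ModelReference",
   "Pset_Asset.SerialNumber",
   "Pset_Asset.InstallationDate",
   "InstallYear",
   "Pset_MemberCommon.Span",
   "Pset_MemberCommon.IsExternal",
   "Pset_MemberCommon.Reference",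
   "Pset_MemberCommon.LoadBearing"]

-- k.replace(".", "_").replace(" ", "_")
def pvSan (k : String) : String :=
  PySem.Str.replace (PySem.Str.replace k "." "_") " " "_"

-- 'k in ps' is key membership; 'ps.get(k)' is the value at k (first match; keys are
-- unique under Pre_). The getD "" is only reached under the isSome guard.
def select_flat_props (ps : List (String × String)) : List (String × String) :=
  pvKeepKeys.foldl
    (fun out k =>
      if ps.any (fun kv => kv.1 == k) then
        out ++ [(pvSan k, ((ps.find? (fun kv => kv.1 == k)).map Prod.snd).getD "")]
      else out)
    []

-- ===== PORT B =====
-- _RANK = {k: i for i, k in enumerate(_KEEP)}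
def pvRank : PySem.Dict String Int :=
  PySem.Dict.ofList (pvKeepKeys.zipIdx.map (fun p => (p.1, (p.2 : Int))))

-- kept = [(k, v) for k, v in ps.items() if k in _RANK]; kept.sort(key=...); then rename
def select_flat_props_alt (ps : List (String × String)) : List (String × String) :=
  (PySem.List.sorted (ps.filter (fun kv => pvRank.contains kv.1))
      (fun kv => pvRank.getD kv.1 0) false).map
    (fun kv => (pvSan kv.1, kv.2))

-- ===== PRECONDITION & SPEC =====
-- Pre_ excludes association lists with duplicate keys: they denote no single Python
-- dict, so which pair wins there is an artefact of the list representation.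
def Pre_select_flat_props (ps : List (String × String)) : Prop := (ps.map Prod.fst).Nodup
instance (ps : List (String × String)) : Decidable (Pre_select_flat_props ps) := by
  unfold Pre_select_flat_props; infer_instance

def pvWitness_select_flat_props : (List (String × String)) :=
  [("Pset_Asset.SerialNumber", "S-1"), ("colour", "red"), ("InstallYear", "2001")]

def Spec_select_flat_props (ps : List (String × String)) (out : List (String × String)) : Prop := out = select_flat_props_alt ps
instance (ps : List (String × String)) (out : List (String × String)) : Decidable (Spec_select_flat_props ps out) := by unfold Spec_select_flat_props; infer_instance

-- ===== CLAIM (what is proved, stated in full; the proofs are below) =====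
def Claim_equal_select_flat_props : Prop := ∀ (ps : List (String × String)), Dom_select_flat_props ps → Pre_select_flat_props ps → Spec_select_flat_props ps (select_flat_props ps)

-- ===== LEMMAS AND PROOFS =====

-- the rank dict contains exactly the whitelist keys
theorem pv_contains_rank (k : String) : pvRank.contains k = pvKeepKeys.contains k := by
  rw [PySem.Dict.contains_eq_decide_mem_keys]
  have hk : pvRank.keys = pvKeepKeys := by decide
  rw [hk]
  by_cases h : k ∈ pvKeepKeys <;> simp [h]

-- under unique keys, filtering by one key yields the (at most one) found pair
theorem pv_filter_eq_find_toList (ps : List (String × String)) (k : String)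
    (h : (ps.map Prod.fst).Nodup) :
    ps.filter (fun kv => kv.1 == k) = (ps.find? (fun kv => kv.1 == k)).toList := by
  induction ps with
  | nil => simp
  | cons a l ih =>
    simp only [List.map_cons, List.nodup_cons] at h
    by_cases hk : a.1 = k
    · subst hk
      simp only [List.filter_cons, List.find?_cons, beq_self_eq_true, if_pos, Option.toList]
      have : l.filter (fun kv => kv.1 == a.1) = [] := by
        apply List.filter_eq_nil_iff.mpr
        intro kv hkv hbeq
        have hkk : kv.1 = a.1 := by simpa using hbeq
        exact h.1 (List.mem_map.mpr ⟨kv, hkv, hkk⟩)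
      simp [this]
    · have hb : (a.1 == k) = false := beq_eq_false_iff_ne.mpr hk
      simp [List.filter_cons, List.find?_cons, hb, ih h.2]

-- filter by a disjunction of disjoint tests splits into concatenated filters, up to permutation
theorem pv_filter_or_perm {α : Type} (p q : α → Bool) (l : List α)
    (hd : ∀ x ∈ l, ¬(p x = true ∧ q x = true)) :
    (l.filter (fun x => p x || q x)).Perm (l.filter p ++ l.filter q) := by
  induction l with
  | nil => simp
  | cons a l ih =>
    have ih' := ih (fun x hx => hd x (List.mem_cons_of_mem a hx))
    by_cases hp : p a = true
    · have hq : q a = false := by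
        rcases Bool.eq_false_or_eq_true (q a) with h | h
        · exact absurd ⟨hp, h⟩ (hd a (List.mem_cons_self))
        · exact h
      simpa [List.filter_cons, hp, hq] using ih'.cons a
    · have hp' : p a = false := by simpa using hp
      by_cases hq : q a = true
      · simpa [List.filter_cons, hp', hq] using (ih'.cons a).trans List.perm_middle.symm
      · have hq' : q a = false := by simpa using hq
        simpa [List.filter_cons, hp', hq'] using ih'

-- the pairs found for a duplicate-free key list are, up to permutation, the kept pairs of ps
theorem pv_perm_main (ks : List String) (ps : List (String × String))
    (hps : (ps.map Prod.fst).Nodup) (hks : ks.Nodup) :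
    (ks.filterMap (fun k => ps.find? (fun kv => kv.1 == k))).Perm
      (ps.filter (fun kv => ks.contains kv.1)) := by
  induction ks with
  | nil => simp
  | cons k ks ih =>
    simp only [List.nodup_cons] at hks
    have hsplit := pv_filter_or_perm (fun kv => kv.1 == k) (fun kv => ks.contains kv.1) ps
      (by
        rintro kv _ ⟨h1, h2⟩
        have e1 : kv.1 = k := by simpa using h1
        have e2 : kv.1 ∈ ks := by simpa using h2
        exact hks.1 (e1 ▸ e2))
    have hperm : (ps.filter (fun kv => (k :: ks).contains kv.1)).Perm
        (ps.filter (fun kv => kv.1 == k) ++ ps.filter (fun kv => ks.contains kv.1)) := by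
      have : (fun kv : String × String => (k :: ks).contains kv.1)
           = (fun kv : String × String => (kv.1 == k) || ks.contains kv.1) := by
        funext kv
        by_cases h : kv.1 = k
        · simp [List.contains_cons, beq_iff_eq, h]
        · simp [List.contains_cons, beq_iff_eq, h]
      rw [this]; exact hsplit
    refine List.Perm.trans ?_ hperm.symm
    rw [pv_filter_eq_find_toList ps k hps] at *
    cases hf : ps.find? (fun kv => kv.1 == k) with
    | none => simpa [List.filterMap_cons, hf] using ih hks.2
    | some kv => simpa [List.filterMap_cons, hf] using (ih hks.2).cons kv

-- found pairs inherit strictly increasing ranks from the key list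
theorem pv_pairwise_found (ks : List String) (ps : List (String × String))
    (h : ks.Pairwise (fun a b => pvRank.getD a 0 < pvRank.getD b 0)) :
    (ks.filterMap (fun k => ps.find? (fun kv => kv.1 == k))).Pairwise
      (fun a b => pvRank.getD a.1 0 < pvRank.getD b.1 0) := by
  rw [List.pairwise_filterMap]
  refine h.imp_of_mem ?_
  intro a b _ _ hab x hx y hy
  have hx' : ps.find? (fun kv => kv.1 == a) = some x := hx
  have hy' : ps.find? (fun kv => kv.1 == b) = some y := hy
  have hxa : x.1 = a := by simpa using List.find?_some hx'
  have hyb : y.1 = b := by simpa using List.find?_some hy'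
  rw [hxa, hyb]; exact hab

-- A's fold equals the map over the found pairs
theorem pv_A_eq_filterMap (ks : List String) (ps : List (String × String)) :
    (ks.filter (fun k => ps.any (fun kv => kv.1 == k))).map
      (fun k => (pvSan k, ((ps.find? (fun kv => kv.1 == k)).map Prod.snd).getD ""))
    = (ks.filterMap (fun k => ps.find? (fun kv => kv.1 == k))).map
        (fun kv => (pvSan kv.1, kv.2)) := by
  induction ks with
  | nil => simp
  | cons k ks ih =>
    cases hf : ps.find? (fun kv => kv.1 == k) with
    | none =>
      have ha : ps.any (fun kv => kv.1 == k) = false := by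
        simp only [List.any_eq_false]
        intro kv hkv
        simpa using List.find?_eq_none.mp hf kv hkv
      simpa [ha, hf] using ih
    | some kv =>
      have hk : kv.1 = k := by simpa using List.find?_some hf
      have ha : ps.any (fun kv => kv.1 == k) = true :=
        List.any_eq_true.mpr ⟨kv, List.mem_of_find?_eq_some hf, by simpa using hk⟩
      simp [ha, hf, hk, ih]

-- ===== VERDICT (by name: the statement is the Claim_ definition above) =====
theorem select_flat_props_spec : Claim_equal_select_flat_props := by
  intro ps _ hpre
  unfold Spec_select_flat_props select_flat_props select_flat_props_alt
  rw [PySem.List.foldl_append_if, List.nil_append, pv_A_eq_filterMap]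
  have hcont : (fun kv : String × String => pvRank.contains kv.1)
      = (fun kv : String × String => pvKeepKeys.contains kv.1) := by
    funext kv; exact pv_contains_rank kv.1
  rw [hcont]
  have hperm := pv_perm_main pvKeepKeys ps hpre (by decide)
  have hpair := pv_pairwise_found pvKeepKeys ps (by decide)
  rw [PySem.List.sorted_eq_of_perm_of_pairwise_lt _ _ _ hperm hpair]
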